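-- pv_equiv track=rewrite | github.com/SebastianOsinski/AdventOfCode2017 | Day 4/day4.py | has_no_anagrams
-- ===== SOURCE A (Python) =====
-- def are_anagrams(word_1, word_2):
--     if len(word_1) != len(word_2):
--         return False
--     return sorted(word_1) == sorted(word_2)
--
-- def has_no_anagrams(passphrase_words):
--     no_of_words = len(passphrase_words)
--     for i in range(0, no_of_words):
--         for j in range(0, no_of_words):
--             if i == j:
--                 continue
--             if are_anagrams(passphrase_words[i], passphrase_words[j]):
--                 return False
--     return True
-- ===== SOURCE B (Python) =====
-- def has_no_anagrams(passphrase_words):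
--     seen = set()
--     for word in passphrase_words:
--         key = tuple(sorted(word))
--         if key in seen:
--             return False
--         seen.add(key)
--     return True
-- ===== Notes on version B (the rewrite author's own statement) =====
-- stated objective: faster
-- what changed: Replaces the nested all-pairs anagram comparison with a single pass that canonicalises each word (sorted letters) and checks membership in a set of previously seen keys, exiting on the first duplicate.
import Mathlib
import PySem

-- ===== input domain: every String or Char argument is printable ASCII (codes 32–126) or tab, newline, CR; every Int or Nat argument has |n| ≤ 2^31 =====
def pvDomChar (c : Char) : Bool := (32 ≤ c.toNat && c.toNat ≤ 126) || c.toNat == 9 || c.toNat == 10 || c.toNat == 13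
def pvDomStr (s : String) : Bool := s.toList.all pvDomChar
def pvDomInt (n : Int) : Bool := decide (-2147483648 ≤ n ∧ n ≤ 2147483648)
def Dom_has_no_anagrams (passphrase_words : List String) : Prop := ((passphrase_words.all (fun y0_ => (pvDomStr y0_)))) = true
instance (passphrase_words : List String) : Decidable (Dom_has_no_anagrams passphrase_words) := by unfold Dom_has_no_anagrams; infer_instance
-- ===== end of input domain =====

-- B replaces A's nested all-pairs anagram scan by a single pass with a set of
-- canonical (letter-sorted) keys, exiting on the first duplicate: asymptotically faster.

-- ===== PORT A =====
def are_anagrams (word_1 word_2 : String) : Bool :=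
  if PySem.Str.len word_1 ≠ PySem.Str.len word_2 then false
  else PySem.List.sorted word_1.toList (fun c => c) false
         == PySem.List.sorted word_2.toList (fun c => c) false

-- inner 'for j in range(0, no_of_words)' loop (true = no early return)
def pvAInner (ws : List String) (i : Nat) : List Nat → Bool
  | [] => true
  | j :: rest =>
    if i = j then pvAInner ws i rest
    else if are_anagrams (ws.getD i "") (ws.getD j "") then false
    else pvAInner ws i rest

-- outer 'for i in range(0, no_of_words)' loop
def pvAOuter (ws : List String) : List Nat → Bool
  | [] => true
  | i :: rest =>
    if pvAInner ws i (List.range ws.length) then pvAOuter ws rest else false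

def has_no_anagrams (passphrase_words : List String) : Bool :=
  pvAOuter passphrase_words (List.range passphrase_words.length)

-- ===== PORT B =====
-- tuple(sorted(word)) — the canonical key
def pvCanon (w : String) : List Char := PySem.List.sorted w.toList (fun c => c) false

-- 'for word in passphrase_words: …' with the accumulated set 'seen'
def pvBLoop (seen : PySem.Set (List Char)) : List String → Bool
  | [] => true
  | w :: rest =>
    let key := pvCanon w
    if PySem.Set.contains seen key then false
    else pvBLoop (PySem.Set.add seen key) rest

def has_no_anagrams_alt (passphrase_words : List String) : Bool :=
  pvBLoop PySem.Set.empty passphrase_words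

-- ===== PRECONDITION & SPEC =====
def Spec_has_no_anagrams (passphrase_words : List String) (out : Bool) : Prop := out = has_no_anagrams_alt passphrase_words
instance (passphrase_words : List String) (out : Bool) : Decidable (Spec_has_no_anagrams passphrase_words out) := by unfold Spec_has_no_anagrams; infer_instance

-- ===== CLAIM (what is proved, stated in full; the proofs are below) =====
def Claim_equal_has_no_anagrams : Prop := ∀ (passphrase_words : List String), Dom_has_no_anagrams passphrase_words → Spec_has_no_anagrams passphrase_words (has_no_anagrams passphrase_words)

-- ===== LEMMAS AND PROOFS =====

theorem are_anagrams_iff (w1 w2 : String) :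
    are_anagrams w1 w2 = true ↔ pvCanon w1 = pvCanon w2 := by
  unfold are_anagrams pvCanon
  split_ifs with h
  · simp only [false_iff]
    intro heq
    apply h
    have h1 := PySem.List.sorted_perm w1.toList (fun c => c) false
    have h2 := PySem.List.sorted_perm w2.toList (fun c => c) false
    have : w1.toList.length = w2.toList.length := by
      rw [← h1.length_eq, ← h2.length_eq, heq]
    simp [PySem.Str.len_eq, this]
  · simp

theorem pvAInner_iff (ws : List String) (i : Nat) (js : List Nat) :
    pvAInner ws i js = true ↔
      ∀ j ∈ js, i ≠ j → pvCanon (ws.getD i "") ≠ pvCanon (ws.getD j "") := by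
  induction js with
  | nil => simp [pvAInner]
  | cons j rest ih =>
    simp only [pvAInner]
    split_ifs with hij hana
    · subst hij
      simp [ih]
    · simp only [false_iff]
      push Not
      exact ⟨j, List.mem_cons_self, hij, (are_anagrams_iff _ _).1 hana⟩
    · rw [ih]
      constructor
      · intro h j' hj' hne
        rcases List.mem_cons.1 hj' with h1 | h1
        · subst h1
          intro hc
          exact hana ((are_anagrams_iff _ _).2 hc)
        · exact h j' h1 hne
      · intro h j' hj' hne
        exact h j' (List.mem_cons_of_mem _ hj') hne

theorem pvAOuter_iff (ws : List String) (is : List Nat) :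
    pvAOuter ws is = true ↔ ∀ i ∈ is, pvAInner ws i (List.range ws.length) = true := by
  induction is with
  | nil => simp [pvAOuter]
  | cons i rest ih =>
    simp only [pvAOuter]
    split_ifs with h
    · simp [ih, h]
    · simp only [false_iff]
      push Not
      exact ⟨i, List.mem_cons_self, by simp [h]⟩

theorem hasA_iff (ws : List String) :
    has_no_anagrams ws = true ↔
      ∀ i < ws.length, ∀ j < ws.length, i ≠ j →
        pvCanon (ws.getD i "") ≠ pvCanon (ws.getD j "") := by
  unfold has_no_anagrams
  rw [pvAOuter_iff]
  constructor
  · intro h i hi j hj hne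
    exact (pvAInner_iff _ _ _).1 (h i (List.mem_range.2 hi)) j (List.mem_range.2 hj) hne
  · intro h i hi
    rw [pvAInner_iff]
    intro j hj hne
    exact h i (List.mem_range.1 hi) j (List.mem_range.1 hj) hne

theorem pvBLoop_iff (ws : List String) (seen : PySem.Set (List Char)) :
    pvBLoop seen ws = true ↔
      (∀ w ∈ ws, pvCanon w ∉ seen) ∧ (ws.map pvCanon).Nodup := by
  induction ws generalizing seen with
  | nil => simp [pvBLoop]
  | cons w rest ih =>
    simp only [pvBLoop]
    split_ifs with h
    · simp only [false_iff]
      intro ⟨h1, _⟩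
      exact h1 w List.mem_cons_self ((PySem.Set.contains_iff _ _).1 h)
    · rw [ih]
      have hmem : pvCanon w ∉ seen := fun hc => h ((PySem.Set.contains_iff _ _).2 hc)
      constructor
      · intro ⟨h1, h2⟩
        refine ⟨?_, ?_⟩
        · intro w' hw'
          rcases List.mem_cons.1 hw' with h3 | h3
          · subst h3; exact hmem
          · intro hc
            exact h1 w' h3 ((PySem.Set.mem_add _ _ _).2 (Or.inl hc))
        · rw [List.map_cons, List.nodup_cons]
          refine ⟨?_, h2⟩
          intro hc
          rcases List.mem_map.1 hc with ⟨w', hw', heq⟩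
          exact h1 w' hw' ((PySem.Set.mem_add _ _ _).2 (Or.inr heq))
      · intro ⟨h1, h2⟩
        rw [List.map_cons, List.nodup_cons] at h2
        refine ⟨?_, h2.2⟩
        intro w' hw' hc
        rcases (PySem.Set.mem_add _ _ _).1 hc with h3 | h3
        · exact h1 w' (List.mem_cons_of_mem _ hw') h3
        · exact h2.1 (List.mem_map.2 ⟨w', hw', h3⟩)

theorem hasB_iff (ws : List String) :
    has_no_anagrams_alt ws = true ↔ (ws.map pvCanon).Nodup := by
  unfold has_no_anagrams_alt
  rw [pvBLoop_iff]
  simp [PySem.Set.empty]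

theorem nodup_iff_pairs (ws : List String) :
    (ws.map pvCanon).Nodup ↔
      ∀ i < ws.length, ∀ j < ws.length, i ≠ j →
        pvCanon (ws.getD i "") ≠ pvCanon (ws.getD j "") := by
  rw [List.Nodup, List.pairwise_iff_getElem]
  constructor
  · intro h i hi j hj hne
    rw [List.getD_eq_getElem ws _ hi, List.getD_eq_getElem ws _ hj]
    rcases Nat.lt_or_ge i j with hlt | hge
    · have := h i j (by simpa using hi) (by simpa using hj) hlt
      simpa using this
    · have hlt : j < i := Nat.lt_of_le_of_ne hge (Ne.symm hne)
      have := h j i (by simpa using hj) (by simpa using hi) hlt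
      intro hc
      exact this (by simpa using hc.symm)
  · intro h i j hi hj hlt
    have hi' : i < ws.length := by simpa using hi
    have hj' : j < ws.length := by simpa using hj
    have := h i hi' j hj' (Nat.ne_of_lt hlt)
    rw [List.getD_eq_getElem ws _ hi', List.getD_eq_getElem ws _ hj'] at this
    simpa using this

-- ===== VERDICT (by name: the statement is the Claim_ definition above) =====
theorem has_no_anagrams_spec : Claim_equal_has_no_anagrams := by
  intro ws _
  unfold Spec_has_no_anagrams
  have hA := hasA_iff ws
  have hB := hasB_iff ws
  have hN := nodup_iff_pairs ws
  exact Bool.eq_iff_iff.2 (hA.trans (hN.symm.trans hB.symm))
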